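-- pv_equiv track=rewrite | github.com/eddmpython/dartlab | src/dartlab/engines/dart/docs/sections/tableParser.py | _dataRows
-- ===== SOURCE A (Python) =====
-- def _dataRows(lines: list[str]) -> list[list[str]]:
--     rows = []
--     sepDone = False
--     for line in lines:
--         cells = [c.strip() for c in line.strip("|").split("|")]
--         if all(set(c.strip()) <= {"-", ":"} for c in cells if c.strip()):
--             sepDone = True
--             continue
--         if sepDone:
--             rows.append(cells)
--     return rows
-- ===== SOURCE B (Python) =====
-- def _dataRows(lines: list[str]) -> list[list[str]]:
--     # Segmentation view: separator rows are delimiters. Mark each line as a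
--     # separator (None) or its cell list, split the marked sequence into groups
--     # at the delimiters, and the answer is everything beyond the first group.
--     def parse(line):
--         cells = [c.strip() for c in line.strip("|").split("|")]
--         return None if all(set(c) <= {"-", ":"} for c in cells if c) else cells
--
--     marked = [parse(line) for line in lines]
--
--     groups, current = [], []
--     for m in marked:
--         if m is None:
--             groups.append(current)
--             current = []
--         else:
--             current.append(m)
--     groups.append(current)
--
--     return [row for g in groups[1:] for row in g]
-- ===== Notes on version B (the rewrite author's own statement) =====
-- stated objective: alternative
-- what changed: Treats separator rows as delimiters: marks each line as separator-or-cells, splits the marked sequence into groups at the delimiters, and returns the concatenation of all groups after the first, instead of A's single flag-carrying accumulate pass.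
import Mathlib
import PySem

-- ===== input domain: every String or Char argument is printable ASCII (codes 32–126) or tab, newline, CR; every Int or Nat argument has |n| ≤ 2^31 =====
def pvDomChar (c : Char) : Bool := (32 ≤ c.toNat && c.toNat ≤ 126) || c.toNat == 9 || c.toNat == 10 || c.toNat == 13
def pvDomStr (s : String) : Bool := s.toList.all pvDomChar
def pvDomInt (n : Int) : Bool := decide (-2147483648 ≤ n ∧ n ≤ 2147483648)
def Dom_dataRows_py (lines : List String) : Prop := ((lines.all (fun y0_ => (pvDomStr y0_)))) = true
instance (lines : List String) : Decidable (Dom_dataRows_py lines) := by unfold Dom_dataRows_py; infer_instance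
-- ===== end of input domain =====

-- B treats separator rows as delimiters: it splits the parsed lines into groups at the
-- separators and concatenates every group after the first (objective: alternative decomposition).

-- ===== PORT A =====
-- the loop body of A's for-loop, state = (rows, sepDone)
def dataRowsStep (st : List (List String) × Bool) (line : String) : List (List String) × Bool :=
  let cells := ((PySem.Str.split? (PySem.Str.stripChars line "|") "|").getD []).map PySem.Str.strip
  if (cells.filter (fun c => !(PySem.Str.strip c == ""))).all
      (fun c => (PySem.Str.strip c).toList.all (fun ch => ch == '-' || ch == ':')) then
    (st.1, true)
  else if st.2 then (st.1 ++ [cells], st.2) else st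

def dataRows_py (lines : List String) : List (List String) :=
  (lines.foldl dataRowsStep ([], false)).1

-- ===== PORT B =====
-- Source B: isSep test inside parse — all(set(c) <= {"-", ":"} for c in cells if c)
def pvIsSep (cells : List String) : Bool :=
  (cells.filter (fun c => !(c == ""))).all (fun c => c.toList.all (fun ch => ch == '-' || ch == ':'))

-- Source B: parse(line) — None marks a separator line, otherwise the cell list
def pvParse (line : String) : Option (List String) :=
  let cells := ((PySem.Str.split? (PySem.Str.stripChars line "|") "|").getD []).map PySem.Str.strip
  if pvIsSep cells then none else some cells

-- Source B: the splitting loop body, state = (groups, current)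
def pvSplitStep (st : List (List (List String)) × List (List String))
    (m : Option (List String)) : List (List (List String)) × List (List String) :=
  match m with
  | none => (st.1 ++ [st.2], [])
  | some cs => (st.1, st.2 ++ [cs])

def dataRows_py_alt (lines : List String) : List (List String) :=
  let marked := lines.map pvParse
  let p := marked.foldl pvSplitStep ([], [])
  let groups := p.1 ++ [p.2]
  (groups.drop 1).flatten

-- ===== PRECONDITION & SPEC =====
def Spec_dataRows_py (lines : List String) (out : List (List String)) : Prop := out = dataRows_py_alt lines
instance (lines : List String) (out : List (List String)) : Decidable (Spec_dataRows_py lines out) := by unfold Spec_dataRows_py; infer_instance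

-- ===== CLAIM (what is proved, stated in full; the proofs are below) =====
def Claim_equal_dataRows_py : Prop := ∀ (lines : List String), Dom_dataRows_py lines → Spec_dataRows_py lines (dataRows_py lines)

-- ===== LEMMAS AND PROOFS =====

-- value of B's pipeline started from an arbitrary split state
def pvValB (lines : List String) (gs : List (List (List String))) (cur : List (List String)) :
    List (List String) :=
  let p := (lines.map pvParse).foldl pvSplitStep (gs, cur)
  ((p.1 ++ [p.2]).drop 1).flatten

theorem dropWhile_of_prefix {p : Char → Bool} {s t : List Char} (h : s <+: t)
    (ht : t.dropWhile p = t) : s.dropWhile p = s := by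
  cases s with
  | nil => simp
  | cons a s' =>
    cases t with
    | nil => simp at h
    | cons b t' =>
      obtain ⟨hab, -⟩ := List.cons_prefix_cons.mp h
      have hpb : p b = false := by
        by_contra hc
        have hpb : p b = true := by simpa using hc
        rw [List.dropWhile_cons, if_pos hpb] at ht
        have := List.length_dropWhile_le p t'
        have := congrArg List.length ht
        simp at this; omega
      rw [List.dropWhile_cons, hab, hpb]; simp

theorem rstrip_prefix (l : List Char) : PySem.Chars.rstrip l <+: l := by
  unfold PySem.Chars.rstrip
  have h : l.reverse.dropWhile PySem.Chars.isspace <:+ l.reverse := List.dropWhile_suffix _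
  have := List.reverse_prefix.mpr h
  simpa using this

theorem strip_idem (cs : List Char) :
    PySem.Chars.strip (PySem.Chars.strip cs) = PySem.Chars.strip cs := by
  unfold PySem.Chars.strip
  have ht : (cs.dropWhile PySem.Chars.isspace).dropWhile PySem.Chars.isspace
      = cs.dropWhile PySem.Chars.isspace := List.dropWhile_idempotent _ _
  have h1 : PySem.Chars.lstrip (PySem.Chars.rstrip (PySem.Chars.lstrip cs))
      = PySem.Chars.rstrip (PySem.Chars.lstrip cs) := by
    unfold PySem.Chars.lstrip
    exact dropWhile_of_prefix (rstrip_prefix _) ht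
  rw [h1]
  unfold PySem.Chars.rstrip
  rw [List.reverse_reverse, List.dropWhile_idempotent]

theorem str_strip_idem (s : String) :
    PySem.Str.strip (PySem.Str.strip s) = PySem.Str.strip s := by
  have h : (PySem.Str.strip (PySem.Str.strip s)).toList = (PySem.Str.strip s).toList := by
    rw [PySem.Str.toList_strip, PySem.Str.toList_strip, strip_idem]
  exact String.toList_injective h

-- A's separator test equals B's isSep on a list of already-stripped cells
theorem condA_gen (cells : List String) (h : ∀ c ∈ cells, PySem.Str.strip c = c) :
    (cells.filter (fun c => !(PySem.Str.strip c == ""))).all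
      (fun c => (PySem.Str.strip c).toList.all (fun ch => ch == '-' || ch == ':'))
    = pvIsSep cells := by
  induction cells with
  | nil => rfl
  | cons x l ih =>
    have hxs := h x (by simp)
    have hx : PySem.Chars.strip x.toList = x.toList := by
      simpa [PySem.Str.toList_strip] using congrArg String.toList hxs
    have ihl := ih (fun c hc => h c (List.mem_cons_of_mem _ hc))
    unfold pvIsSep at *
    simp at ihl ⊢
    simp [hxs, hx, ihl]

-- A's cell list for a line
def pvCells (line : String) : List String :=
  ((PySem.Str.split? (PySem.Str.stripChars line "|") "|").getD []).map PySem.Str.strip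

theorem condA_eq_isSep (l : List String) :
    ((l.map PySem.Str.strip).filter (fun c => !(PySem.Str.strip c == ""))).all
      (fun c => (PySem.Str.strip c).toList.all (fun ch => ch == '-' || ch == ':'))
    = pvIsSep (l.map PySem.Str.strip) := by
  refine condA_gen _ ?_
  intro c hc
  obtain ⟨a, -, rfl⟩ := List.mem_map.mp hc
  exact str_strip_idem a

theorem step_eq (st : List (List String) × Bool) (line : String) :
    dataRowsStep st line =
      if pvIsSep (pvCells line) then (st.1, true)
      else if st.2 then (st.1 ++ [pvCells line], st.2) else st := by
  unfold dataRowsStep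
  simp only [condA_eq_isSep]
  rfl

theorem parse_eq (line : String) :
    pvParse line = if pvIsSep (pvCells line) then none else some (pvCells line) := rfl

-- post-separator invariant: A's accumulated rows = flatten of B's groups past the first, plus the current group
theorem fold_true (lines : List String) (rows : List (List String))
    (gs : List (List (List String))) (cur : List (List String))
    (hgs : gs ≠ []) (hinv : (gs.drop 1).flatten ++ cur = rows) :
    (lines.foldl dataRowsStep (rows, true)).1 = pvValB lines gs cur := by
  induction lines generalizing rows gs cur with
  | nil =>
    obtain ⟨g0, gs', rfl⟩ := List.exists_cons_of_ne_nil hgs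
    simp [pvValB, ← hinv]
  | cons line l ih =>
    rw [List.foldl_cons, step_eq]
    unfold pvValB
    rw [List.map_cons, List.foldl_cons, parse_eq]
    by_cases hs : pvIsSep (pvCells line) = true
    · simp only [hs, if_true]
      exact ih rows (gs ++ [cur]) [] (by simp) (by
        obtain ⟨g0, gs', rfl⟩ := List.exists_cons_of_ne_nil hgs
        simpa using hinv)
    · simp only [Bool.not_eq_true] at hs
      simp only [hs, Bool.false_eq_true, if_false, if_true]
      exact ih (rows ++ [pvCells line]) gs (cur ++ [pvCells line]) hgs (by
        rw [← List.append_assoc, hinv])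

-- pre-separator: A has accumulated nothing; B's first (to-be-discarded) group is arbitrary
theorem fold_false (lines : List String) (cur : List (List String)) :
    (lines.foldl dataRowsStep ([], false)).1 = pvValB lines [] cur := by
  induction lines generalizing cur with
  | nil => simp [pvValB]
  | cons line l ih =>
    rw [List.foldl_cons, step_eq]
    unfold pvValB
    rw [List.map_cons, List.foldl_cons, parse_eq]
    by_cases hs : pvIsSep (pvCells line) = true
    · simp only [hs, if_true]
      exact fold_true l [] [cur] [] (by simp) (by simp)
    · simp only [Bool.not_eq_true] at hs
      simp only [hs, Bool.false_eq_true, if_false]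
      exact ih (cur ++ [pvCells line])

-- ===== VERDICT (by name: the statement is the Claim_ definition above) =====
theorem dataRows_py_spec : Claim_equal_dataRows_py := by
  intro lines _
  unfold Spec_dataRows_py dataRows_py dataRows_py_alt
  exact fold_false lines []
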